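-- pv_equiv track=rewrite | github.com/EuniAI/awesome-code-agents | scripts/update_papers_badge.py | approx_text_width
-- ===== SOURCE A (Python) =====
-- def approx_text_width(text: str) -> int:
--     # Very rough width estimation for SVG text in px
--     # Works well enough for shields-like small font sizing
--     if not text:
--         return 0
--     # Digits are a bit wider typically; use 7 for digits, 6 for letters, 5 for punctuation/others
--     width = 0
--     for ch in text:
--         if ch.isdigit():
--             width += 7
--         elif ch.isalpha():
--             width += 6
--         else:
--             width += 5
--     return width
-- ===== SOURCE B (Python) =====
-- def approx_text_width(text: str) -> int:
--     # Closed form: every char contributes a base of 5; digits add 2 more, letters add 1 more.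
--     digits = sum(1 for c in text if c.isdigit())
--     alphas = sum(1 for c in text if c.isalpha())
--     return 5 * len(text) + 2 * digits + alphas
-- ===== Notes on version B (the rewrite author's own statement) =====
-- stated objective: alternative
-- what changed: Replaced the per-character accumulating loop (with empty-string guard and 7/6/5 branches) by category counts combined in one closed-form expression 5*len + 2*digits + alphas.
import Mathlib
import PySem

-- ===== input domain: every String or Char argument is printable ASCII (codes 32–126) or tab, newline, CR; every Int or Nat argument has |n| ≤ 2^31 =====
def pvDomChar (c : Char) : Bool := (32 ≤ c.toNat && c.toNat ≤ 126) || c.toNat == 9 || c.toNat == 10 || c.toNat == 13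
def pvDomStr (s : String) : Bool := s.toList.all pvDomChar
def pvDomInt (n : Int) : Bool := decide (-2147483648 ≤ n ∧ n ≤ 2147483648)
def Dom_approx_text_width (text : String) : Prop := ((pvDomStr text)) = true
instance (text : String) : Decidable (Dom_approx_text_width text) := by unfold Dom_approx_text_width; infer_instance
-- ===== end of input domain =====

-- B replaces A's accumulating loop over 7/6/5 branches by two category counts
-- combined in the closed form 5*len + 2*digits + alphas (alternative decomposition).

-- ===== PORT A =====
def approx_text_width (text : String) : Int :=
  if text.toList.isEmpty then 0
  else
    text.toList.foldl
      (fun width ch =>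
        if PySem.Chars.isdigit ch then width + 7
        else if PySem.Chars.isalpha ch then width + 6
        else width + 5)
      0

-- ===== PORT B =====
def approx_text_width_alt (text : String) : Int :=
  let digits : Int := (text.toList.countP (fun c => PySem.Chars.isdigit c) : Nat)
  let alphas : Int := (text.toList.countP (fun c => PySem.Chars.isalpha c) : Nat)
  5 * (text.toList.length : Int) + 2 * digits + alphas

-- ===== PRECONDITION & SPEC =====
def Spec_approx_text_width (text : String) (out : Int) : Prop := out = approx_text_width_alt text
instance (text : String) (out : Int) : Decidable (Spec_approx_text_width text out) := by unfold Spec_approx_text_width; infer_instance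

-- ===== CLAIM (what is proved, stated in full; the proofs are below) =====
def Claim_equal_approx_text_width : Prop := ∀ (text : String), Dom_approx_text_width text → Spec_approx_text_width text (approx_text_width text)

-- ===== LEMMAS AND PROOFS =====
theorem pv_digit_not_alpha (c : Char) (h : PySem.Chars.isdigit c = true) :
    PySem.Chars.isalpha c = false := by
  unfold PySem.Chars.isdigit at h
  unfold PySem.Chars.isalpha PySem.Chars.isupper PySem.Chars.islower
  simp_all [Char.le_def, UInt32.le_iff_toNat_le]
  omega

theorem pv_fold_eq (l : List Char) (acc : Int) :
    l.foldl
      (fun width ch =>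
        if PySem.Chars.isdigit ch then width + 7
        else if PySem.Chars.isalpha ch then width + 6
        else width + 5)
      acc
    = acc + 5 * (l.length : Int)
        + 2 * ((l.countP (fun c => PySem.Chars.isdigit c) : Nat) : Int)
        + ((l.countP (fun c => PySem.Chars.isalpha c) : Nat) : Int) := by
  induction l generalizing acc with
  | nil => simp
  | cons c t ih =>
    by_cases hd : PySem.Chars.isdigit c = true
    · have ha := pv_digit_not_alpha c hd
      simp [hd, ha, ih]
      ring
    · by_cases ha : PySem.Chars.isalpha c = true
      · simp [hd, ha, ih]
        ring
      · simp [hd, ha, ih]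
        ring

-- ===== VERDICT (by name: the statement is the Claim_ definition above) =====
theorem approx_text_width_spec : Claim_equal_approx_text_width := by
  intro text _
  unfold Spec_approx_text_width approx_text_width approx_text_width_alt
  by_cases h : text.toList.isEmpty
  · have : text.toList = [] := List.isEmpty_iff.mp h
    simp [this]
  · simp [h, pv_fold_eq]
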